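-- pv_equiv track=rewrite | github.com/rakou1986/open-aoe2-jp | rating_statistics.py | group_peaks
-- ===== SOURCE A (Python) =====
-- def group_peaks(peaks, min_peak_distance=200):
--     """山のグループ化"""
--     if not peaks:
--         return []
--     groups = [[peaks[0]]]
--     for p in peaks[1:]:
--         if p - groups[-1][-1] < min_peak_distance:
--             groups[-1].append(p)
--         else:
--             groups.append([p])
--     return groups
-- ===== SOURCE B (Python) =====
-- def group_peaks(peaks, min_peak_distance=200):
--     """Build the grouping back-to-front: traverse peaks right-to-left and
--     prepend each peak either onto the current first group (if the gap to its
--     head is below the threshold) or as a new first group."""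
--     groups = []
--     for p in reversed(peaks):
--         if groups and groups[0][0] - p < min_peak_distance:
--             groups[0].insert(0, p)
--         else:
--             groups.insert(0, [p])
--     return groups
-- ===== Notes on version B (the rewrite author's own statement) =====
-- stated objective: alternative
-- what changed: B builds the grouping back-to-front: it traverses the peaks right-to-left and prepends each peak onto the head group (or opens a new head group), instead of A's left-to-right loop that appends onto the tail group.
import Mathlib
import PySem

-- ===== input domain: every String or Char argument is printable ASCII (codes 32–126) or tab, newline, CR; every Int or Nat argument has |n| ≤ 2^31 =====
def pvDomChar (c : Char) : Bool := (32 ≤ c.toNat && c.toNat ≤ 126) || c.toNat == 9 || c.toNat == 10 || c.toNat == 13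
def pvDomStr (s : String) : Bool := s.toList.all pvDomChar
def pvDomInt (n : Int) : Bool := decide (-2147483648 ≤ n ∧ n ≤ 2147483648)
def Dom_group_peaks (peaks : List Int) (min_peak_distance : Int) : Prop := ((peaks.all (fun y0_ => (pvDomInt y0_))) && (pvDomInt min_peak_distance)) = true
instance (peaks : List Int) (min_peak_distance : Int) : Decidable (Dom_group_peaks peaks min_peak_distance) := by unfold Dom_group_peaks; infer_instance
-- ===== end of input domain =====

-- B changes the decomposition: it builds the grouping back-to-front (right-to-left traversal,
-- prepending onto the head group) instead of A's left-to-right loop appending onto the tail group.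

-- ===== PORT A =====
-- one loop step of A: `groups[-1][-1]` — throughout A's run every group is nonempty and
-- `groups` is nonempty (it starts as [[peaks[0]]]), so the `getLastD` defaults never fire.
def stepA (min_peak_distance : Int) (groups : List (List Int)) (p : Int) : List (List Int) :=
  if p - ((groups.getLastD []).getLastD 0) < min_peak_distance then
    groups.dropLast ++ [(groups.getLastD []) ++ [p]]
  else
    groups ++ [[p]]

def group_peaks (peaks : List Int) (min_peak_distance : Int) : List (List Int) :=
  match peaks with
  | [] => []
  | p0 :: rest => rest.foldl (stepA min_peak_distance) [[p0]]

-- ===== PORT B =====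
-- one step of B's reversed loop: in B's run `groups`' first group is never empty,
-- so the wildcard branch only fires for `groups = []`.
def stepB (min_peak_distance : Int) (p : Int) (groups : List (List Int)) : List (List Int) :=
  match groups with
  | (q :: g) :: gs => if q - p < min_peak_distance then (p :: q :: g) :: gs else [p] :: (q :: g) :: gs
  | _ => [p] :: groups

-- `for p in reversed(peaks)` with prepends = a right fold over peaks.
def group_peaks_alt (peaks : List Int) (min_peak_distance : Int) : List (List Int) :=
  peaks.foldr (stepB min_peak_distance) []

-- ===== PRECONDITION & SPEC =====
def Spec_group_peaks (peaks : List Int) (min_peak_distance : Int) (out : List (List Int)) : Prop := out = group_peaks_alt peaks min_peak_distance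
instance (peaks : List Int) (min_peak_distance : Int) (out : List (List Int)) : Decidable (Spec_group_peaks peaks min_peak_distance out) := by unfold Spec_group_peaks; infer_instance

-- ===== CLAIM (what is proved, stated in full; the proofs are below) =====
def Claim_equal_group_peaks : Prop := ∀ (peaks : List Int) (min_peak_distance : Int), Dom_group_peaks peaks min_peak_distance → Spec_group_peaks peaks min_peak_distance (group_peaks peaks min_peak_distance)

-- ===== LEMMAS AND PROOFS =====

-- glue the open tail group `c` of A's state onto B's grouping of the remaining peaks
def glue (m : Int) (c : List Int) (R : List (List Int)) : List (List Int) :=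
  match R with
  | (q :: h) :: hs => if q - c.getLastD 0 < m then (c ++ q :: h) :: hs else c :: R
  | _ => c :: R

theorem foldA_glue (m : Int) (rest : List Int) : ∀ (G : List (List Int)) (c : List Int),
    List.foldl (stepA m) (G ++ [c]) rest = G ++ glue m c (List.foldr (stepB m) [] rest) := by
  induction rest with
  | nil => intro G c; simp [glue]
  | cons p t ih =>
    intro G c
    have hlast : (G ++ [c]).getLastD [] = c := by simp
    have hdrop : (G ++ [c]).dropLast = G := by simp
    simp only [List.foldl_cons, List.foldr_cons]
    by_cases h : p - c.getLast?.getD 0 < m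
    · have hs : stepA m (G ++ [c]) p = G ++ [c ++ [p]] := by
        simp [stepA, hlast, hdrop, h]
      rw [hs, ih G (c ++ [p])]
      congr 1
      cases hR : List.foldr (stepB m) [] t with
      | nil => simp [stepB, glue, h]
      | cons r rs =>
        cases r with
        | nil => simp [stepB, glue, h]
        | cons q g =>
          by_cases h2 : q - p < m
          · simp [stepB, glue, h, h2]
          · simp [stepB, glue, h, h2]
    · have h' : m ≤ p - c.getLast?.getD 0 := not_lt.1 h
      have hs : stepA m (G ++ [c]) p = (G ++ [c]) ++ [[p]] := by
        simp [stepA, h']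
      rw [hs, ih (G ++ [c]) [p]]
      have hxx : G ++ [c] ++ glue m [p] (List.foldr (stepB m) [] t)
           = G ++ (c :: glue m [p] (List.foldr (stepB m) [] t)) := by simp
      rw [hxx]
      congr 1
      cases hR : List.foldr (stepB m) [] t with
      | nil => simp [stepB, glue, h']
      | cons r rs =>
        cases r with
        | nil => simp [stepB, glue, h']
        | cons q g =>
          by_cases h2 : q - p < m
          · simp [stepB, glue, h', h2]
          · simp [stepB, glue, h', h2]

-- ===== VERDICT (by name: the statement is the Claim_ definition above) =====
theorem group_peaks_spec : Claim_equal_group_peaks := by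
  intro peaks m _
  unfold Spec_group_peaks
  cases peaks with
  | nil => rfl
  | cons p0 rest =>
    show List.foldl (stepA m) [[p0]] rest = _
    have := foldA_glue m rest [] [p0]
    simp only [List.nil_append] at this
    rw [this]
    show _ = stepB m p0 (List.foldr (stepB m) [] rest)
    cases hR : List.foldr (stepB m) [] rest with
    | nil => simp [stepB, glue]
    | cons r rs =>
      cases r with
      | nil => simp [stepB, glue]
      | cons q g =>
        by_cases h2 : q - p0 < m
        · simp [stepB, glue, h2]
        · simp [stepB, glue, h2]
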